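-- pv_equiv track=rewrite | github.com/rohini-1925/Placement_Preparation | diffOfSum.py | diffOfSum
-- ===== SOURCE A (Python) =====
-- def diffOfSum(n,m):
--     divid=0
--     nodivid=0
--     for i in range(1,m+1):
--         if i%n==0:
--             divid=divid+i
--         else:
--             nodivid=nodivid+i
--     return abs(nodivid-divid)
-- ===== SOURCE B (Python) =====
-- def diffOfSum(n, m):
--     # closed forms: O(1) instead of the O(m) loop
--     if m < 1:
--         return 0
--     a = abs(n)
--     total = m * (m + 1) // 2
--     k = m // a
--     divid = a * k * (k + 1) // 2
--     return abs(total - 2 * divid)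
-- ===== Notes on version B (the rewrite author's own statement) =====
-- stated objective: faster
-- what changed: Replaced the O(m) loop over 1..m with closed-form arithmetic-series formulas: total = m(m+1)//2 and the sum of multiples of |n| up to m is |n|*k(k+1)//2 with k = m//|n|, so the answer is |total - 2*divid| in O(1).
import Mathlib
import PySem

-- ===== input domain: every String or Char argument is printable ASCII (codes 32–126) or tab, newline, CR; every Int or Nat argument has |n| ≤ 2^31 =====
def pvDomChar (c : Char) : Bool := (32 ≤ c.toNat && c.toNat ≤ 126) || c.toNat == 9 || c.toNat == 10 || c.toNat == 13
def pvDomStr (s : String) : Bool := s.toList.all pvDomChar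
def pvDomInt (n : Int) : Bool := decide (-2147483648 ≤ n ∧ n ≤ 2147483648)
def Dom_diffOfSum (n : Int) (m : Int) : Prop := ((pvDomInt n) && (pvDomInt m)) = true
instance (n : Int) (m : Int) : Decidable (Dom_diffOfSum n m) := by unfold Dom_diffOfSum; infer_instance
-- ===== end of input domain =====

-- B replaces A's O(m) accumulation loop by closed-form arithmetic-series formulas (objective: faster).

-- ===== PORT A =====
def diffOfSum (n : Int) (m : Int) : Int :=
  let st := (PySem.List.pyRange 1 (m + 1) 1).foldl
    (fun (st : Int × Int) i =>
      if PySem.Int.mod i n = 0 then (st.1 + i, st.2) else (st.1, st.2 + i))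
    ((0 : Int), (0 : Int))
  |st.2 - st.1|

-- ===== PORT B =====
def diffOfSum_alt (n : Int) (m : Int) : Int :=
  if m < 1 then 0
  else
    let a := |n|
    let total := PySem.Int.floordiv (m * (m + 1)) 2
    let k := PySem.Int.floordiv m a
    let divid := PySem.Int.floordiv (a * k * (k + 1)) 2
    |total - 2 * divid|

-- ===== PRECONDITION & SPEC =====
-- Pre_ excludes exactly the inputs where A raises ZeroDivisionError: n = 0 with a nonempty loop (m ≥ 1).
def Pre_diffOfSum (n : Int) (m : Int) : Prop := n ≠ 0 ∨ m < 1
instance (n : Int) (m : Int) : Decidable (Pre_diffOfSum n m) := by unfold Pre_diffOfSum; infer_instance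
def pvWitness_diffOfSum : Int × Int := (3, 10)
def Spec_diffOfSum (n : Int) (m : Int) (out : Int) : Prop := out = diffOfSum_alt n m
instance (n : Int) (m : Int) (out : Int) : Decidable (Spec_diffOfSum n m out) := by unfold Spec_diffOfSum; infer_instance

-- ===== CLAIM (what is proved, stated in full; the proofs are below) =====
def Claim_equal_diffOfSum : Prop := ∀ (n : Int) (m : Int), Dom_diffOfSum n m → Pre_diffOfSum n m → Spec_diffOfSum n m (diffOfSum n m)

-- ===== LEMMAS AND PROOFS =====

-- The loop invariant: after folding over 1..j, with a = |n| > 0, there are k, r with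
-- j = a*k + r (0 ≤ r < a), twice the divisible accumulator is a*k*(k+1), and twice the
-- total accumulated sum is j*(j+1).
lemma diffOfSum_fold_closed (n : Int) (hn : n ≠ 0) (j : Nat) :
    ∃ k r : Int, 0 ≤ r ∧ r < |n| ∧ (j : Int) = |n| * k + r ∧
      (2 * ((PySem.List.pyRange 1 ((j : Int) + 1) 1).foldl
        (fun (st : Int × Int) i =>
          if PySem.Int.mod i n = 0 then (st.1 + i, st.2) else (st.1, st.2 + i))
        ((0 : Int), (0 : Int))).1 = |n| * k * (k + 1)) ∧
      (2 * (((PySem.List.pyRange 1 ((j : Int) + 1) 1).foldl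
        (fun (st : Int × Int) i =>
          if PySem.Int.mod i n = 0 then (st.1 + i, st.2) else (st.1, st.2 + i))
        ((0 : Int), (0 : Int))).1 +
        ((PySem.List.pyRange 1 ((j : Int) + 1) 1).foldl
        (fun (st : Int × Int) i =>
          if PySem.Int.mod i n = 0 then (st.1 + i, st.2) else (st.1, st.2 + i))
        ((0 : Int), (0 : Int))).2) = (j : Int) * ((j : Int) + 1)) := by
  have ha : 0 < |n| := abs_pos.mpr hn
  induction j with
  | zero =>
    refine ⟨0, 0, le_refl 0, ha, by simp, ?_, ?_⟩ <;>
      simp [PySem.List.pyRange_one_eq_nil (by omega : (1:Int) ≥ 1)]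
  | succ j ih =>
    obtain ⟨k, r, hr0, hra, hjkr, h1, h2⟩ := ih
    have hsplit : PySem.List.pyRange 1 ((↑(j+1) : Int) + 1) 1
        = PySem.List.pyRange 1 ((j : Int) + 1) 1 ++ [(j : Int) + 1] := by
      push_cast
      exact PySem.List.pyRange_one_succ_right (by omega)
    rw [hsplit, List.foldl_append]
    set p := (PySem.List.pyRange 1 ((j : Int) + 1) 1).foldl
        (fun (st : Int × Int) i =>
          if PySem.Int.mod i n = 0 then (st.1 + i, st.2) else (st.1, st.2 + i))
        ((0 : Int), (0 : Int)) with hp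
    simp only [List.foldl_cons, List.foldl_nil]
    by_cases hdvd : PySem.Int.mod ((j : Int) + 1) n = 0
    · have hd : |n| ∣ ((j : Int) + 1) := by
        rw [PySem.Int.mod_eq_zero_iff_dvd] at hdvd
        exact (abs_dvd n _).mpr hdvd
      -- a ∣ j+1 and j+1 = a*k + (r+1) force r+1 = a
      have hdr : |n| ∣ (r + 1) := by
        have : (j : Int) + 1 = |n| * k + (r + 1) := by omega
        exact (Int.dvd_add_right ⟨k, by linarith⟩).mp (this ▸ hd)
      have hra1 : r + 1 = |n| := le_antisymm (by omega) (Int.le_of_dvd (by omega) hdr)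
      refine ⟨k + 1, 0, le_refl 0, ha, by push_cast; linarith, ?_, ?_⟩
      · rw [if_pos hdvd]
        simp only
        have hj1 : (j : Int) + 1 = |n| * (k + 1) := by linarith
        linear_combination h1 + 2 * hj1
      · rw [if_pos hdvd]
        simp only
        push_cast
        linear_combination h2
    · have hra1 : r + 1 < |n| := by
        rcases lt_or_eq_of_le (by omega : r + 1 ≤ |n|) with h | h
        · exact h
        · exfalso
          apply hdvd
          rw [PySem.Int.mod_eq_zero_iff_dvd, ← abs_dvd]
          exact ⟨k + 1, by linarith⟩
      refine ⟨k, r + 1, by omega, hra1, by push_cast; omega, ?_, ?_⟩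
      · rw [if_neg hdvd]; simpa using h1
      · rw [if_neg hdvd]
        simp only
        push_cast
        linear_combination h2

-- ===== VERDICT (by name: the statement is the Claim_ definition above) =====
theorem diffOfSum_spec : Claim_equal_diffOfSum := by
  intro n m _ hpre
  unfold Spec_diffOfSum diffOfSum diffOfSum_alt
  by_cases hm : m < 1
  · rw [if_pos hm]
    simp [PySem.List.pyRange_one_eq_nil (by omega : m + 1 ≤ 1)]
  · rw [if_neg hm]
    have hn : n ≠ 0 := hpre.resolve_right hm
    have ha : 0 < |n| := abs_pos.mpr hn
    obtain ⟨k, r, hr0, hra, hjkr, h1, h2⟩ := diffOfSum_fold_closed n hn m.toNat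
    have hmc : ((m.toNat : Nat) : Int) = m := by omega
    rw [hmc] at hjkr h1 h2
    set p := (PySem.List.pyRange 1 (m + 1) 1).foldl
        (fun (st : Int × Int) i =>
          if PySem.Int.mod i n = 0 then (st.1 + i, st.2) else (st.1, st.2 + i))
        ((0 : Int), (0 : Int)) with hp
    simp only
    have hk : PySem.Int.floordiv m |n| = k := by
      rw [PySem.Int.floordiv_eq_ediv_of_pos ha, hjkr,
        show |n| * k + r = r + |n| * k by ring,
        Int.add_mul_ediv_left r k (ne_of_gt ha),
        Int.ediv_eq_zero_of_lt hr0 hra]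
      simp
    have htot : 2 * PySem.Int.floordiv (m * (m + 1)) 2 = m * (m + 1) := by
      rw [PySem.Int.floordiv_eq_ediv_of_pos (by omega : (0:Int) < 2)]
      exact Int.mul_ediv_cancel' (Int.even_mul_succ_self _).two_dvd
    have hdiv : 2 * PySem.Int.floordiv (|n| * k * (k + 1)) 2 = |n| * k * (k + 1) := by
      rw [PySem.Int.floordiv_eq_ediv_of_pos (by omega : (0:Int) < 2)]
      apply Int.mul_ediv_cancel'
      obtain ⟨c, hc⟩ := Int.even_mul_succ_self k
      exact ⟨|n| * c, by linear_combination |n| * hc⟩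
    rw [hk]
    have hval : p.2 - p.1 = PySem.Int.floordiv (m * (m + 1)) 2
        - 2 * PySem.Int.floordiv (|n| * k * (k + 1)) 2 := by linarith
    rw [hval]
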